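-- pv_equiv track=rewrite | github.com/GeorgiiZdorovetskiy/lab_linal | normal/task6.py | order_of_sr
-- ===== SOURCE A (Python) =====
-- def order_of_sr(N: int) -> int:
--     """
--     Находит порядок элемента s^r в группе Z_p^*
--     """
--     p_values = [29, 31, 37, 23, 19]
--     r_values = [59, 60, 38, 45, 44]
--     s_values = [5, 4, 3, 17, 15]
--
--     p = p_values[N % 5]
--     r = r_values[N % 5]
--     s = s_values[N % 5]
--
--     s_r = pow(s, r, p)
--
--     order = 1
--     current = s_r
--     while current != 1:
--         current = (current * s_r) % p
--         order += 1
--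
--     return order
-- ===== SOURCE B (Python) =====
-- def order_of_sr(N: int) -> int:
--     """
--     Находит порядок элемента s^r в группе Z_p^*
--     (order = smallest d with (p-1) % d == 0 and base^d == 1 mod p)
--     """
--     table = {0: (29, 59, 5), 1: (31, 60, 4), 2: (37, 38, 3), 3: (23, 45, 17), 4: (19, 44, 15)}
--     p, r, s = table[N % 5]
--     base = pow(s, r, p)
--     return next(d for d in range(1, p) if (p - 1) % d == 0 and pow(base, d, p) == 1)
-- ===== Notes on version B (the rewrite author's own statement) =====
-- stated objective: alternative
-- what changed: Instead of repeatedly multiplying s^r by itself until hitting the identity (A's while loop with a running product and counter), B looks the (p,r,s) triple up in a dict keyed by the residue of N and returns the first exponent d below p that divides the group order and raises base to the identity mod p, which is the multiplicative order by Lagrange's theorem.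
import Mathlib
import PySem

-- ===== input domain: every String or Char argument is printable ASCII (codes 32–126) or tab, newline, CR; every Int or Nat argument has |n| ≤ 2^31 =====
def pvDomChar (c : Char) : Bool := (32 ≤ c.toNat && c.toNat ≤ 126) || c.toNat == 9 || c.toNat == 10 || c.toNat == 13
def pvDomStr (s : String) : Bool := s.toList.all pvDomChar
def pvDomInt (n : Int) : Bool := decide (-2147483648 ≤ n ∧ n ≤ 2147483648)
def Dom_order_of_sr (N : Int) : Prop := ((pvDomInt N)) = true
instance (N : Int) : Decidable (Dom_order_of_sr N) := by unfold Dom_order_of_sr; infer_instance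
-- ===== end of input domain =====

-- B replaces A's repeated-multiplication order loop by one filtered scan of range(1,p)
-- taking the first d dividing p-1 with base^d ≡ 1 (mod p); objective: alternative algorithm.

-- ===== PORT A =====
-- A's 'while current != 1' loop; fuel p.toNat only makes the recursion total (the loop
-- terminates in at most p-2 steps since the order of s^r divides p-1 < p).
def orderLoopA (p sr : Int) : Nat → Int → Int → Int
  | 0, order, _ => order
  | fuel + 1, order, current =>
    if current ≠ 1 then orderLoopA p sr fuel (order + 1) (PySem.Int.mod (current * sr) p)
    else order

def order_of_sr (N : Int) : Int :=
  let p_values : List Int := [29, 31, 37, 23, 19]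
  let r_values : List Int := [59, 60, 38, 45, 44]
  let s_values : List Int := [5, 4, 3, 17, 15]
  let i := PySem.Int.mod N 5
  let p := (PySem.List.pyGet? p_values i).getD 0   -- i ∈ [0,5): never the default
  let r := (PySem.List.pyGet? r_values i).getD 0
  let s := (PySem.List.pyGet? s_values i).getD 0
  let s_r := PySem.Int.powMod s r.toNat p   -- .toNat exact: r is a positive table constant
  orderLoopA p s_r p.toNat 1 s_r

-- ===== PORT B =====
def order_of_sr_alt (N : Int) : Int :=
  let table : PySem.Dict Int (Int × Int × Int) := PySem.Dict.ofList
    [(0, (29, 59, 5)), (1, (31, 60, 4)), (2, (37, 38, 3)), (3, (23, 45, 17)), (4, (19, 44, 15))]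
  -- table[N % 5]: N % 5 ∈ {0,…,4} is always a key, so the KeyError default is never taken
  let prs : Int × Int × Int := (PySem.Dict.get? table (PySem.Int.mod N 5)).getD (0, 0, 0)
  let p := prs.1
  let base := PySem.Int.powMod prs.2.2 prs.2.1.toNat p   -- .toNat exact: r is a positive table constant
  -- next(d for d in range(1, p) if (p-1) % d == 0 and pow(base, d, p) == 1):
  -- head? is never none (d = p-1 always qualifies by Fermat), so the StopIteration default 0 is unreachable
  (((PySem.List.pyRange 1 p 1).filter
      (fun d => PySem.Int.mod (p - 1) d == 0 && PySem.Int.powMod base d.toNat p == 1)).head?).getD 0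

-- ===== PRECONDITION & SPEC =====
def Spec_order_of_sr (N : Int) (out : Int) : Prop := out = order_of_sr_alt N
instance (N : Int) (out : Int) : Decidable (Spec_order_of_sr N out) := by unfold Spec_order_of_sr; infer_instance

-- ===== CLAIM (what is proved, stated in full; the proofs are below) =====
def Claim_equal_order_of_sr : Prop := ∀ (N : Int), Dom_order_of_sr N → Spec_order_of_sr N (order_of_sr N)

-- ===== LEMMAS AND PROOFS =====
-- Both programs depend on N only through N % 5 ∈ {0,1,2,3,4}; each residue case computes.

-- ===== VERDICT (by name: the statement is the Claim_ definition above) =====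
theorem order_of_sr_spec : Claim_equal_order_of_sr := by
  intro N _
  unfold Spec_order_of_sr order_of_sr order_of_sr_alt
  have h0 : 0 ≤ PySem.Int.mod N 5 := PySem.Int.mod_nonneg N (by norm_num)
  have h5 : PySem.Int.mod N 5 < 5 := PySem.Int.mod_lt N (by norm_num)
  generalize PySem.Int.mod N 5 = i at *
  interval_cases i <;> decide
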